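-- pv_equiv track=rewrite | github.com/CuP-Z/CoCRS | model_con.py | _edge_list
-- ===== SOURCE A (Python) =====
-- from collections import defaultdict
--
-- def _edge_list(kg, n_entity, hop):
--     edge_list = []
--     for h in range(hop):
--         for entity in range(n_entity):
--             # add self loop
--             # edge_list.append((entity, entity))
--             # self_loop id = 185
--             edge_list.append((entity, entity, 185))
--             if entity not in kg:
--                 continue
--             for tail_and_relation in kg[entity]:
--                 if entity != tail_and_relation[1] and tail_and_relation[0] != 185 :# and tail_and_relation[0] in EDGE_TYPES:
--                     edge_list.append((entity, tail_and_relation[1], tail_and_relation[0]))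
--                     edge_list.append((tail_and_relation[1], entity, tail_and_relation[0]))
--
--     relation_cnt = defaultdict(int)
--     relation_idx = {}
--     for h, t, r in edge_list:
--         relation_cnt[r] += 1
--
--     count_min = 500
--     for h, t, r in edge_list:
--         if relation_cnt[r] > count_min and r not in relation_idx:
--             relation_idx[r] = len(relation_idx)
--
--     return [(h, t, relation_idx[r]) for h, t, r in edge_list if relation_cnt[r] > count_min], len(relation_idx)
-- ===== SOURCE B (Python) =====
-- from collections import Counter
--
-- def _edge_list(kg, n_entity, hop):
--     if hop <= 0:
--         return [], 0
--     # One hop's edge block built once; relation counts scaled by hop instead of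
--     # duplicating the list; relation index kept as a first-appearance list.
--     def block(e):
--         yield (e, e, 185)
--         for r, t in kg.get(e, []):
--             if e != t and r != 185:
--                 yield (e, t, r)
--                 yield (t, e, r)
--
--     single = [edge for e in range(n_entity) for edge in block(e)]
--     cnt = Counter(r for _, _, r in single)
--     kept_rels = []
--     for _, _, r in single:
--         if cnt[r] * hop > 500 and r not in kept_rels:
--             kept_rels.append(r)
--     out = [(h, t, kept_rels.index(r)) for h, t, r in single if cnt[r] * hop > 500]
--     return out * hop, len(kept_rels)
-- ===== Notes on version B (the rewrite author's own statement) =====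
-- stated objective: simpler
-- what changed: B generates one hop's edge block via a generator/comprehension pipeline instead of A's hop-times accumulation loop, counts relations once with Counter and compares count*hop against 500, keeps the qualifying relations as a first-appearance list (list.index replaces A's dict of running sizes), and replicates the filtered block hop times only at the end, so counting/indexing/filtering no longer run over the hop-fold duplicated list.
import Mathlib
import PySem

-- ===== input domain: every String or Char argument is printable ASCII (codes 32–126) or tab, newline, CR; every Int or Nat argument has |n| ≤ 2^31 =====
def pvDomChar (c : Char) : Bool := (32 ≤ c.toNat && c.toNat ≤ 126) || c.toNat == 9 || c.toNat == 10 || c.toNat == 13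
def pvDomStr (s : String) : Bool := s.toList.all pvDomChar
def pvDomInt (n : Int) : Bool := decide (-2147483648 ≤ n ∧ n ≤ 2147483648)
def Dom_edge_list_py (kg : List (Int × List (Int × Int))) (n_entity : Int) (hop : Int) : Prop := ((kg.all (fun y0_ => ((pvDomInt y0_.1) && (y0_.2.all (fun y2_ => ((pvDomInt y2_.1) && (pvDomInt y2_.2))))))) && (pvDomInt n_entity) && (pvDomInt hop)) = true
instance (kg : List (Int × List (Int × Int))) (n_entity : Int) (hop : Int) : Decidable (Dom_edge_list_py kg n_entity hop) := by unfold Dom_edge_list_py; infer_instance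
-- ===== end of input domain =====

-- B builds one hop's edge block once (flatMap pipeline), counts relations with Counter and
-- compares count*hop against 500, keeps qualifying relations as a first-appearance list
-- (list index instead of A's dict of running sizes), and replicates the filtered block at
-- the end (simpler: no hop-fold duplication before counting).

-- ===== PORT A =====
def edge_list_py (kg : List (Int × List (Int × Int))) (n_entity : Int) (hop : Int) : (List (Int × Int × Int)) × Int :=
  let kgd : PySem.Dict Int (List (Int × Int)) := PySem.Dict.ofList kg
  let edges : List (Int × Int × Int) :=
    (PySem.List.pyRange 0 hop 1).foldl (fun acc _ =>
      (PySem.List.pyRange 0 n_entity 1).foldl (fun acc entity =>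
        let acc := acc ++ [(entity, entity, (185 : Int))]
        match kgd.get? entity with        -- 'if entity not in kg: continue' + 'kg[entity]'
        | none => acc
        | some tails => tails.foldl (fun acc tr =>
            if entity ≠ tr.2 ∧ tr.1 ≠ 185 then
              acc ++ [(entity, tr.2, tr.1), (tr.2, entity, tr.1)]
            else acc) acc) acc) []
  let relation_cnt : PySem.Dict Int Int :=
    edges.foldl (fun d htr => d.modify htr.2.2 0 (· + 1)) PySem.Dict.empty
  let relation_idx : PySem.Dict Int Int :=
    edges.foldl (fun ix htr =>
      if relation_cnt.getD htr.2.2 0 > 500 ∧ ¬ ix.contains htr.2.2 then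
        ix.insert htr.2.2 (ix.size : Int)
      else ix) PySem.Dict.empty
  -- relation_idx[r] in the comprehension: ported as getD (the guard cnt > 500 guarantees the key was inserted)
  ((edges.filter (fun htr => decide (relation_cnt.getD htr.2.2 0 > 500))).map
      (fun htr => (htr.1, htr.2.1, relation_idx.getD htr.2.2 0)),
   (relation_idx.size : Int))

-- ===== PORT B =====
def edge_list_py_alt (kg : List (Int × List (Int × Int))) (n_entity : Int) (hop : Int) : (List (Int × Int × Int)) × Int :=
  if hop ≤ 0 then ([], 0) else
  let kgd : PySem.Dict Int (List (Int × Int)) := PySem.Dict.ofList kg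
  let single : List (Int × Int × Int) :=
    (PySem.List.pyRange 0 n_entity 1).flatMap (fun e =>
      (e, e, (185 : Int)) ::
        (kgd.getD e []).flatMap (fun rt =>
          if e ≠ rt.2 ∧ rt.1 ≠ 185 then [(e, rt.2, rt.1), (rt.2, e, rt.1)] else []))
  let cnt : PySem.Dict Int Int := PySem.Dict.counter (single.map (fun htr => htr.2.2))
  let kept_rels : List Int := single.foldl (fun ks htr =>
      if cnt.getD htr.2.2 0 * hop > 500 ∧ htr.2.2 ∉ ks then ks ++ [htr.2.2] else ks) []
  -- kept_rels.index(r): ported as index? + getD (the guard cnt*hop > 500 guarantees membership)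
  let out : List (Int × Int × Int) := single.filterMap (fun htr =>
      if cnt.getD htr.2.2 0 * hop > 500 then
        some (htr.1, htr.2.1, (((PySem.List.index? kept_rels htr.2.2).getD 0 : Nat) : Int))
      else none)
  (PySem.List.pyRepeat out hop, (kept_rels.length : Int))

-- ===== PRECONDITION & SPEC =====
def Spec_edge_list_py (kg : List (Int × List (Int × Int))) (n_entity : Int) (hop : Int) (out : (List (Int × Int × Int)) × Int) : Prop := out = edge_list_py_alt kg n_entity hop
instance (kg : List (Int × List (Int × Int))) (n_entity : Int) (hop : Int) (out : (List (Int × Int × Int)) × Int) : Decidable (Spec_edge_list_py kg n_entity hop out) := by unfold Spec_edge_list_py; infer_instance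

-- ===== CLAIM (what is proved, stated in full; the proofs are below) =====
def Claim_equal_edge_list_py : Prop := ∀ (kg : List (Int × List (Int × Int))) (n_entity : Int) (hop : Int), Dom_edge_list_py kg n_entity hop → Spec_edge_list_py kg n_entity hop (edge_list_py kg n_entity hop)

-- ===== LEMMAS AND PROOFS =====

-- one entity's contribution to the edge list (B's block; A's inner loop builds the same)
def pvBlock (kgd : PySem.Dict Int (List (Int × Int))) (e : Int) : List (Int × Int × Int) :=
  (e, e, (185 : Int)) ::
    (kgd.getD e []).flatMap (fun rt =>
      if e ≠ rt.2 ∧ rt.1 ≠ 185 then [(e, rt.2, rt.1), (rt.2, e, rt.1)] else [])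

def pvSingle (kgd : PySem.Dict Int (List (Int × Int))) (n_entity : Int) : List (Int × Int × Int) :=
  (PySem.List.pyRange 0 n_entity 1).flatMap (pvBlock kgd)

-- A's relation_idx step and B's kept_rels step, with an abstract keep-predicate q
def pvIdxStep (q : Int → Bool) (ix : PySem.Dict Int Int) (htr : Int × Int × Int) : PySem.Dict Int Int :=
  if q htr.2.2 ∧ ¬ ix.contains htr.2.2 then ix.insert htr.2.2 (ix.size : Int) else ix

def pvStepB (q : Int → Bool) (ks : List Int) (htr : Int × Int × Int) : List Int :=
  if q htr.2.2 ∧ htr.2.2 ∉ ks then ks ++ [htr.2.2] else ks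

-- the dict A builds, expressed from the list B builds
def pvMkIx (ks : List Int) : PySem.Dict Int Int :=
  PySem.Dict.mk (ks.zipIdx.map (fun p => (p.1, (p.2 : Int))))

theorem pvTailsFold (e : Int) (tails : List (Int × Int)) (acc : List (Int × Int × Int)) :
    tails.foldl (fun acc tr =>
        if e ≠ tr.2 ∧ tr.1 ≠ 185 then acc ++ [(e, tr.2, tr.1), (tr.2, e, tr.1)] else acc) acc
      = acc ++ tails.flatMap (fun tr =>
          if e ≠ tr.2 ∧ tr.1 ≠ 185 then [(e, tr.2, tr.1), (tr.2, e, tr.1)] else []) := by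
  rw [PySem.List.foldl_congr_mem _ _
        (fun acc tr => acc ++ (if e ≠ tr.2 ∧ tr.1 ≠ 185 then [(e, tr.2, tr.1), (tr.2, e, tr.1)] else [])) _
        (by intro acc tr _; split <;> simp_all)]
  exact PySem.List.foldl_append_eq_flatMap _ _ _

theorem pvEntityFoldA (kgd : PySem.Dict Int (List (Int × Int))) (n_entity : Int)
    (acc : List (Int × Int × Int)) :
    (PySem.List.pyRange 0 n_entity 1).foldl (fun acc entity =>
        let acc := acc ++ [(entity, entity, (185 : Int))]
        match kgd.get? entity with
        | none => acc
        | some tails => tails.foldl (fun acc tr =>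
            if entity ≠ tr.2 ∧ tr.1 ≠ 185 then
              acc ++ [(entity, tr.2, tr.1), (tr.2, entity, tr.1)]
            else acc) acc) acc
      = acc ++ pvSingle kgd n_entity := by
  rw [PySem.List.foldl_congr_mem _ _ (fun acc e => acc ++ pvBlock kgd e) _ ?_]
  · exact PySem.List.foldl_append_eq_flatMap _ _ _
  · intro acc e _
    simp only [pvBlock, PySem.Dict.getD]
    cases h : kgd.get? e <;> simp only [h] <;> simp [pvTailsFold]

theorem pvEdgesA (kgd : PySem.Dict Int (List (Int × Int))) (n_entity hop : Int) :
    (PySem.List.pyRange 0 hop 1).foldl (fun acc _ =>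
        (PySem.List.pyRange 0 n_entity 1).foldl (fun acc entity =>
          let acc := acc ++ [(entity, entity, (185 : Int))]
          match kgd.get? entity with
          | none => acc
          | some tails => tails.foldl (fun acc tr =>
              if entity ≠ tr.2 ∧ tr.1 ≠ 185 then
                acc ++ [(entity, tr.2, tr.1), (tr.2, entity, tr.1)]
              else acc) acc) acc) []
      = (List.replicate hop.toNat (pvSingle kgd n_entity)).flatten := by
  rw [PySem.List.foldl_congr_mem _ _ (fun acc _ => acc ++ pvSingle kgd n_entity) _
        (by intro acc x _; exact pvEntityFoldA kgd n_entity acc)]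
  rw [PySem.List.foldl_append_eq_flatMap, List.nil_append]
  have h1 : (PySem.List.pyRange 0 hop 1).flatMap (fun _ => pvSingle kgd n_entity)
      = (List.replicate (PySem.List.pyRange 0 hop 1).length (pvSingle kgd n_entity)).flatten := by
    induction PySem.List.pyRange 0 hop 1 with
    | nil => simp
    | cons a l ih => simp [ih, List.replicate_succ]
  rw [h1, PySem.List.length_pyRange_one]
  norm_num

-- counting in k concatenated copies
theorem pvCountFlattenReplicate {α : Type} [BEq α] (a : α) (l : List α) (k : Nat) :
    List.count a (List.replicate k l).flatten = k * List.count a l := by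
  induction k with
  | zero => simp
  | succ k ih => simp [List.replicate_succ, List.count_append, ih]; ring

-- the counter fold over triples is Counter of the relation ids
theorem pvCntEq (l : List (Int × Int × Int)) :
    l.foldl (fun d (htr : Int × Int × Int) => d.modify htr.2.2 0 (· + 1)) PySem.Dict.empty
      = PySem.Dict.counter (l.map (fun htr => htr.2.2)) := by
  rw [PySem.Dict.counter_eq_foldl, List.foldl_map]

-- pvMkIx facts
theorem pvZipIdxFst (ks : List Int) (k : Nat) : (ks.zipIdx k).map Prod.fst = ks := by
  induction ks generalizing k with
  | nil => rfl
  | cons x t ih => simp [List.zipIdx_cons, ih]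

theorem pvMkIx_keys (ks : List Int) : (pvMkIx ks).keys = ks := by
  simp only [pvMkIx, PySem.Dict.keys, List.map_map]
  have : ((fun p : Int × Int => p.1) ∘ fun p : Int × Nat => (p.1, (p.2 : Int))) = Prod.fst := by
    funext p; rfl
  rw [this, pvZipIdxFst]

theorem pvMkIx_contains (ks : List Int) (r : Int) :
    (pvMkIx ks).contains r = decide (r ∈ ks) := by
  rw [PySem.Dict.contains_eq_decide_mem_keys, pvMkIx_keys]

theorem pvMkIx_size (ks : List Int) : (pvMkIx ks).size = ks.length := by
  simp [pvMkIx, PySem.Dict.size]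

theorem pvMkIx_insert (ks : List Int) (r : Int) (h : r ∉ ks) :
    (pvMkIx ks).insert r ((pvMkIx ks).size : Int) = pvMkIx (ks ++ [r]) := by
  apply PySem.Dict.ext
  rw [PySem.Dict.items_insert_of_not_contains _ _ (by rw [pvMkIx_contains]; simpa using h),
      pvMkIx_size]
  simp only [pvMkIx]
  rw [List.zipIdx_append]
  simp [List.zipIdx_cons]

theorem pvMkIx_getD (ks : List Int) (r : Int) (hnd : ks.Nodup) (h : r ∈ ks) :
    (pvMkIx ks).getD r 0 = ((ks.idxOf r : Nat) : Int) := by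
  have hget : ks[ks.idxOf r]? = some r := List.getElem?_idxOf h
  have hmem : ((r, ks.idxOf r) : Int × Nat) ∈ ks.zipIdx :=
    List.mem_zipIdx_iff_getElem?.mpr hget
  have hitems : ((r, ((ks.idxOf r : Nat) : Int)) : Int × Int) ∈ (pvMkIx ks).items := by
    simp only [pvMkIx]
    exact List.mem_map.mpr ⟨(r, ks.idxOf r), hmem, rfl⟩
  exact PySem.Dict.getD_of_mem_items _ hitems (by rw [pvMkIx_keys]; exact hnd) 0

-- the two index-building folds run in lockstep
theorem pvFoldAB (q : Int → Bool) (l : List (Int × Int × Int)) (ks : List Int) :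
    l.foldl (pvIdxStep q) (pvMkIx ks) = pvMkIx (l.foldl (pvStepB q) ks) := by
  induction l generalizing ks with
  | nil => rfl
  | cons htr l ih =>
    have hstep : pvIdxStep q (pvMkIx ks) htr = pvMkIx (pvStepB q ks htr) := by
      simp only [pvIdxStep, pvStepB, pvMkIx_contains]
      by_cases hq : q htr.2.2 <;> by_cases hm : htr.2.2 ∈ ks <;>
        simp [hq, hm, pvMkIx_insert]
    rw [List.foldl_cons, List.foldl_cons, hstep, ih]

theorem pvFoldB_nodup (q : Int → Bool) (l : List (Int × Int × Int)) (ks : List Int)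
    (h : ks.Nodup) : (l.foldl (pvStepB q) ks).Nodup := by
  induction l generalizing ks with
  | nil => exact h
  | cons htr l ih =>
    apply ih
    simp only [pvStepB]
    split
    · rename_i hc; simpa using List.Nodup.append h (by simp) (by simpa using hc.2)
    · exact h

theorem pvFoldB_mono (q : Int → Bool) (l : List (Int × Int × Int)) (ks : List Int)
    (r : Int) (h : r ∈ ks) : r ∈ l.foldl (pvStepB q) ks := by
  induction l generalizing ks with
  | nil => exact h
  | cons htr l ih =>
    apply ih
    simp only [pvStepB]
    split <;> simp [h]

theorem pvFoldB_complete (q : Int → Bool) (l : List (Int × Int × Int)) (ks : List Int) :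
    ∀ htr ∈ l, q htr.2.2 = true → htr.2.2 ∈ l.foldl (pvStepB q) ks := by
  induction l generalizing ks with
  | nil => intro htr h; simp at h
  | cons hd l ih =>
    intro htr hmem hq
    rcases List.mem_cons.mp hmem with h | h
    · subst h
      rw [List.foldl_cons]
      apply pvFoldB_mono
      simp only [pvStepB]
      split <;> rename_i hc
      · simp
      · rw [not_and_or, not_not] at hc
        rcases hc with hc | hc
        · exact absurd hq hc
        · exact hc
    · exact ih _ htr h hq

theorem pvFoldB_stable (q : Int → Bool) (l : List (Int × Int × Int)) (ks : List Int)
    (h : ∀ htr ∈ l, q htr.2.2 = true → htr.2.2 ∈ ks) :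
    l.foldl (pvStepB q) ks = ks := by
  induction l with
  | nil => rfl
  | cons hd l ih =>
    have hstep : pvStepB q ks hd = ks := by
      simp only [pvStepB]
      split
      · rename_i hc; exact absurd (h hd (by simp) hc.1) hc.2
      · rfl
    simp only [List.foldl_cons, hstep]
    exact ih (fun htr hm hq => h htr (List.mem_cons_of_mem _ hm) hq)

theorem pvFoldB_repeat (q : Int → Bool) (l : List (Int × Int × Int)) (k : Nat) (hk : 1 ≤ k) :
    (List.replicate k l).flatten.foldl (pvStepB q) []
      = l.foldl (pvStepB q) [] := by
  obtain ⟨k, rfl⟩ : ∃ m, k = m + 1 := ⟨k - 1, by omega⟩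
  rw [List.replicate_succ, List.flatten_cons, List.foldl_append]
  set ks0 := l.foldl (pvStepB q) [] with hks0
  induction k with
  | zero => simp
  | succ k ih =>
    rw [List.replicate_succ, List.flatten_cons, List.foldl_append,
        pvFoldB_stable q l ks0 (fun htr hm hq => pvFoldB_complete q l [] htr hm hq)]
    exact ih (by omega)

-- comprehension with a filter: filterMap of an if-some is filter-then-map
theorem pvFilterMapIf {α β : Type} (p : α → Bool) (f : α → β) (l : List α) :
    l.filterMap (fun x => if p x then some (f x) else none)
      = (l.filter p).map f := by
  induction l with
  | nil => rfl
  | cons x l ih => by_cases h : p x <;> simp [h, ih]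

theorem pvIdxOf?_of_mem (ks : List Int) (r : Int) (h : r ∈ ks) :
    List.idxOf? r ks = some (ks.idxOf r) := by
  induction ks with
  | nil => simp at h
  | cons x t ih =>
    by_cases hx : x = r
    · subst hx; simp [List.idxOf?_cons]
    · rcases List.mem_cons.mp h with h' | h'
      · exact absurd h'.symm hx
      · simp [List.idxOf?_cons, hx, ih h']

-- ===== VERDICT (by name: the statement is the Claim_ definition above) =====
theorem edge_list_py_spec : Claim_equal_edge_list_py := by
  intro kg n_entity hop _
  unfold Spec_edge_list_py edge_list_py edge_list_py_alt
  simp only [pvEdgesA]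
  rcases (by omega : hop ≤ 0 ∨ 0 < hop) with hle | hpos
  case inl =>
    rw [if_pos hle]
    have h0 : hop.toNat = 0 := by omega
    rw [h0]
    simp [PySem.Dict.size, PySem.Dict.empty]
  rw [if_neg (by omega)]
  set kgd := PySem.Dict.ofList kg with hkgd
  have hSingle : ((PySem.List.pyRange 0 n_entity 1).flatMap (fun e =>
      (e, e, (185 : Int)) :: (kgd.getD e []).flatMap (fun rt =>
        if e ≠ rt.2 ∧ rt.1 ≠ 185 then [(e, rt.2, rt.1), (rt.2, e, rt.1)] else [])))
      = pvSingle kgd n_entity := rfl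
  rw [hSingle, pvCntEq]
  set S := pvSingle kgd n_entity with hS
  set k := hop.toNat with hk
  set cA := PySem.Dict.counter (((List.replicate k S).flatten).map (fun htr : Int × Int × Int => htr.2.2)) with hcA
  set cB := PySem.Dict.counter (S.map (fun htr : Int × Int × Int => htr.2.2)) with hcB
  have hcnt : ∀ r : Int, cA.getD r 0 = (k : Int) * cB.getD r 0 := by
    intro r
    rw [hcA, hcB, PySem.Dict.getD_counter, PySem.Dict.getD_counter,
        List.map_flatten, List.map_replicate, pvCountFlattenReplicate]
    push_cast; ring
  have hnn : ∀ r : Int, 0 ≤ cB.getD r 0 := by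
    intro r; rw [hcB, PySem.Dict.getD_counter]; exact Int.natCast_nonneg _
  set q : Int → Bool := fun r => decide (cB.getD r 0 * hop > 500) with hq
  have hiff : ∀ r : Int, (cA.getD r 0 > 500 ↔ q r = true) := by
    intro r
    rw [hq]; simp only [decide_eq_true_eq]; rw [hcnt r]
    have hc := hnn r
    rcases (by omega : hop ≤ 0 ∨ 0 < hop) with h0 | h0
    · have hk0 : (k : Int) = 0 := by omega
      rw [hk0]
      constructor
      · intro hgt; nlinarith
      · intro hgt; nlinarith
    · have hkh : (k : Int) = hop := by omega
      rw [hkh, mul_comm]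
  have hpfun : ∀ htr : Int × Int × Int,
      (decide (cA.getD htr.2.2 0 > 500)) = q htr.2.2 := by
    intro htr
    have h := hiff htr.2.2
    by_cases hcond : cA.getD htr.2.2 0 > 500
    · simp [hcond, h.mp hcond]
    · have hf : q htr.2.2 = false := by
        rcases Bool.eq_false_or_eq_true (q htr.2.2) with h' | h'
        · exact absurd (h.mpr h') hcond
        · exact h'
      simp [hcond, hf]
  -- index folds
  have hidxA : (List.replicate k S).flatten.foldl (fun ix htr =>
      if cA.getD htr.2.2 0 > 500 ∧ ¬ix.contains htr.2.2 = true then ix.insert htr.2.2 (ix.size : Int) else ix)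
      PySem.Dict.empty
      = pvMkIx ((List.replicate k S).flatten.foldl (pvStepB q) []) := by
    rw [PySem.List.foldl_congr_mem _ _ (pvIdxStep q) _ (by
      intro ix htr _
      simp only [pvIdxStep]
      exact if_congr (and_congr (hiff htr.2.2) Iff.rfl) rfl rfl)]
    exact pvFoldAB q _ []
  set keptL := S.foldl (pvStepB q) [] with hkept
  have hflatfold : (List.replicate k S).flatten.foldl (pvStepB q) [] = keptL := by
    rcases Nat.eq_zero_or_pos k with hk0 | hk1
    · rw [hk0]
      simp only [List.replicate_zero, List.flatten_nil, List.foldl_nil]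
      rw [hkept, pvFoldB_stable]
      intro htr _ hqt
      exfalso
      have hle : hop ≤ 0 := by omega
      have hqt' : decide (cB.getD htr.2.2 0 * hop > 500) = true := hqt
      have := of_decide_eq_true hqt'
      nlinarith [hnn htr.2.2]
    · exact pvFoldB_repeat q S k hk1
  have hkeptB : S.foldl (fun ks htr =>
      if cB.getD htr.2.2 0 * hop > 500 ∧ htr.2.2 ∉ ks then ks ++ [htr.2.2] else ks) [] = keptL := by
    rw [hkept]
    exact PySem.List.foldl_congr_mem _ _ (pvStepB q) _ (by
      intro ks htr _
      simp only [pvStepB]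
      exact if_congr (and_congr (by rw [hq]; simp) Iff.rfl) rfl rfl)
  rw [hidxA, hflatfold, hkeptB]
  have hnd : keptL.Nodup := pvFoldB_nodup q S [] List.nodup_nil
  -- outputs
  have hfilterA : (List.replicate k S).flatten.filter (fun htr => decide (cA.getD htr.2.2 0 > 500))
      = (List.replicate k S).flatten.filter (fun htr => q htr.2.2) :=
    List.filter_congr (fun htr _ => hpfun htr)
  have hmapsame : ∀ l : List (Int × Int × Int), (∀ htr ∈ l, htr ∈ S) →
      (l.filter (fun htr => q htr.2.2)).map (fun htr => (htr.1, htr.2.1, (pvMkIx keptL).getD htr.2.2 0))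
      = (l.filter (fun htr => q htr.2.2)).map
          (fun htr => (htr.1, htr.2.1, (((PySem.List.index? keptL htr.2.2).getD 0 : Nat) : Int))) := by
    intro l hsub
    apply List.map_congr_left
    intro htr hm
    have hmem := List.mem_filter.mp hm
    have hqht : q htr.2.2 = true := of_decide_eq_true (by simpa using hmem.2)
    have hrk : htr.2.2 ∈ keptL := pvFoldB_complete q S [] htr (hsub _ hmem.1) hqht
    have := pvMkIx_getD keptL htr.2.2 hnd hrk
    rw [this, PySem.List.index?_eq_idxOf?, pvIdxOf?_of_mem _ _ hrk]
    rfl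
  have hBfm : S.filterMap (fun htr =>
      if cB.getD htr.2.2 0 * hop > 500 then
        some (htr.1, htr.2.1, (((PySem.List.index? keptL htr.2.2).getD 0 : Nat) : Int))
      else none)
      = (S.filter (fun htr => q htr.2.2)).map
          (fun htr => (htr.1, htr.2.1, (((PySem.List.index? keptL htr.2.2).getD 0 : Nat) : Int))) := by
    rw [← pvFilterMapIf (fun htr : Int × Int × Int => q htr.2.2)]
    apply List.filterMap_congr
    intro htr _
    exact if_congr (by rw [hq]; simp) rfl rfl
  refine Prod.ext ?_ ?_
  · rw [hfilterA, List.filter_flatten, List.map_replicate, List.map_flatten, List.map_replicate,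
        hmapsame S (fun _ h => h), hBfm, PySem.List.pyRepeat, ← hk]
  · rw [pvMkIx_size]
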